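-- pv_equiv track=rewrite | github.com/MrBrantCode/unitest_baseline | mut_generate/mist_train_cf/cf_55966/solution.py | count_unique_palindromes
-- ===== SOURCE A (Python) =====
-- import itertools
--
-- def is_palindrome(s):
--     return s == s[::-1]
--
-- def count_unique_palindromes(input_string):
--     unique_combinations = set()
--     for length in range(1, len(input_string) + 1):
--         for comb in itertools.combinations(input_string, length):
--             sorted_comb = "".join(sorted(comb))
--             if sorted_comb in unique_combinations:
--                 continue
--             unique_combinations.add(sorted_comb)
--             if is_palindrome(sorted_comb):
--                 yield sorted_comb
-- ===== SOURCE B (Python) =====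
-- def count_unique_palindromes(input_string):
--     # A sorted combination is a palindrome iff all its characters are equal,
--     # so the output is exactly: for each length L, one run c*L per character c
--     # occurring at least L times, in first-occurrence order.
--     counts = {}
--     for ch in input_string:
--         counts[ch] = counts.get(ch, 0) + 1
--     for length in range(1, len(input_string) + 1):
--         for ch, cnt in counts.items():
--             if cnt >= length:
--                 yield ch * length
-- ===== Notes on version B (the rewrite author's own statement) =====
-- stated objective: faster
-- what changed: Instead of enumerating all 2^n combinations, sorting each and deduplicating with a set, B uses the fact that a sorted string is a palindrome iff all its characters are equal: it counts character occurrences once and emits c*L for every character c with count >= L, per length, in first-occurrence order.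
import Mathlib
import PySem

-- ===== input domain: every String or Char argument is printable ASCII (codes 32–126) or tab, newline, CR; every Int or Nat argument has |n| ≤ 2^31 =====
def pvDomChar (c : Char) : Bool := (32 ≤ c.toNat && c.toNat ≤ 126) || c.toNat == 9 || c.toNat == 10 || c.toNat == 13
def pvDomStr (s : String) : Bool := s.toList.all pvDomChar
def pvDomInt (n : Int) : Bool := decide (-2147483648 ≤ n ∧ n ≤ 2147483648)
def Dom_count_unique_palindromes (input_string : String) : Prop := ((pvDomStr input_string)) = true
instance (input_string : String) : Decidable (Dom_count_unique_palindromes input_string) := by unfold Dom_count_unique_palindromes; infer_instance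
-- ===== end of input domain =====

-- B replaces A's exponential enumeration of all combinations by a character-count
-- closed form (a sorted combination is a palindrome iff all its characters are equal).
-- Python A/B are generators; the ports collect the yielded values in order.

-- ===== PORT A =====
-- is_palindrome(s): s == s[::-1]
def is_palindrome (s : String) : Bool :=
  PySem.Str.slice? s none none (-1) == some s

-- body of A's inner 'for comb in itertools.combinations(...)' loop
def pvStepA (st : PySem.Set String × List String) (comb : List Char) :
    PySem.Set String × List String :=
  -- "".join(sorted(comb)) : the characters of comb sorted, joined back into a string
  let sorted_comb := String.ofList (PySem.List.sorted comb (fun x => x) false)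
  if PySem.Set.contains st.1 sorted_comb then st
  else
    let uc := PySem.Set.add st.1 sorted_comb
    if is_palindrome sorted_comb then (uc, st.2 ++ [sorted_comb]) else (uc, st.2)

def count_unique_palindromes (input_string : String) : List String :=
  let cs := input_string.toList
  ((PySem.List.pyRange 1 (PySem.List.len cs + 1) 1).foldl
    (fun st length => (PySem.List.combinations cs length.toNat).foldl pvStepA st)
    ((PySem.Set.empty : PySem.Set String), ([] : List String))).2

-- ===== PORT B =====
def count_unique_palindromes_alt (input_string : String) : List String :=
  let cs := input_string.toList
  -- counts[ch] = counts.get(ch, 0) + 1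
  let counts := cs.foldl (fun d ch => d.insert ch (d.getD ch 0 + 1))
    (PySem.Dict.empty : PySem.Dict Char Int)
  (PySem.List.pyRange 1 (PySem.List.len cs + 1) 1).foldl
    (fun out length =>
      counts.items.foldl
        (fun out p =>
          if p.2 ≥ length then out ++ [String.ofList (PySem.List.pyRepeat [p.1] length)]
          else out)
        out)
    []

-- ===== PRECONDITION & SPEC =====
def Spec_count_unique_palindromes (input_string : String) (out : List String) : Prop := out = count_unique_palindromes_alt input_string
instance (input_string : String) (out : List String) : Decidable (Spec_count_unique_palindromes input_string out) := by unfold Spec_count_unique_palindromes; infer_instance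

-- ===== CLAIM (what is proved, stated in full; the proofs are below) =====
def Claim_equal_count_unique_palindromes : Prop := ∀ (input_string : String), Dom_count_unique_palindromes input_string → Spec_count_unique_palindromes input_string (count_unique_palindromes input_string)

-- ===== LEMMAS AND PROOFS =====

lemma pal_sorted_const (l : List Char) (hs : l.Pairwise (· ≤ ·)) (hp : l.reverse = l) :
    ∀ a ∈ l, ∀ b ∈ l, a = b := by
  rw [List.pairwise_iff_getElem] at hs
  have hrev : ∀ i (hi : i < l.length), l[i] = l[l.length - 1 - i]'(by omega) := by
    intro i hi
    have h2 := List.getElem_of_eq hp (i := i) (by simpa using hi)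
    rw [← h2, List.getElem_reverse]
  have hlast : ∀ i (hi : i < l.length), l[i] = l[0]'(by omega) := by
    intro i hi
    have h0 : l[0]'(by omega) ≤ l[i] := by
      rcases Nat.eq_zero_or_pos i with h | h
      · subst h; exact le_refl _
      · exact hs 0 i (by omega) hi h
    have h1 : l[i] ≤ l[0]'(by omega) := by
      have e : l[0]'(by omega) = l[l.length - 1]'(by omega) := by
        have := hrev 0 (by omega); simpa using this
      rw [e]
      rcases Nat.lt_or_ge i (l.length - 1) with h | h
      · exact hs i (l.length - 1) hi (by omega) h
      · have : i = l.length - 1 := by omega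
        subst this; exact le_refl _
    exact le_antisymm h1 h0
  intro a ha b hb
  obtain ⟨i, hi, rfl⟩ := List.mem_iff_getElem.1 ha
  obtain ⟨j, hj, rfl⟩ := List.mem_iff_getElem.1 hb
  rw [hlast i hi, hlast j hj]

lemma ofList_inj {l m : List Char} (h : String.ofList l = String.ofList m) : l = m := by
  have := congrArg String.toList h; simpa using this

lemma is_pal_replicate (L : Nat) (c : Char) :
    is_palindrome (String.ofList (List.replicate L c)) = true := by
  rw [is_palindrome, PySem.Str.slice?_none_none_neg_one]
  simp

lemma sorted_replicate (L : Nat) (c : Char) :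
    PySem.List.sorted (List.replicate L c) (fun x => x) false = List.replicate L c :=
  List.perm_replicate.mp (PySem.List.sorted_perm _ _ _)



-- the abstract per-length emission process: which characters yield, in which order
def emit (seen : List Char) : List (List Char) → List Char × List Char
  | [] => ([], seen)
  | [] :: rest => emit seen rest
  | (c :: r) :: rest =>
    if r.all (· == c) then
      if c ∈ seen then emit seen rest
      else
        let p := emit (c :: seen) rest
        (c :: p.1, p.2)
    else emit seen rest

lemma emit_append (u v : List (List Char)) : ∀ seen,
    emit seen (u ++ v) =
      ((emit seen u).1 ++ (emit (emit seen u).2 v).1, (emit (emit seen u).2 v).2) := by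
  induction u with
  | nil => intro seen; simp [emit]
  | cons t rest ih =>
    intro seen
    match t with
    | [] => simpa [emit] using ih seen
    | c :: r =>
      by_cases hall : r.all (· == c)
      · by_cases hc : c ∈ seen
        · simpa [emit, hall, hc] using ih seen
        · simp [emit, hall, hc, ih (c :: seen)]
      · simpa [emit, hall] using ih seen

lemma emit_map_cons (ts : List (List Char)) (x : Char) : ∀ seen,
    emit seen (ts.map (x :: ·)) =
      if x ∉ seen ∧ (∃ t ∈ ts, t.all (· == x)) then ([x], x :: seen) else ([], seen) := by
  induction ts with
  | nil => intro seen; simp [emit]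
  | cons t rest ih =>
    intro seen
    by_cases hall : t.all (· == x)
    · by_cases hx : x ∈ seen
      · rw [if_neg (by tauto)]
        simp [emit, hall, hx, ih seen]
      · rw [if_pos ⟨hx, t, List.mem_cons_self, hall⟩]
        have h2 : emit (x :: seen) (rest.map (x :: ·)) = ([], x :: seen) := by
          rw [ih (x :: seen), if_neg (by simp)]
        simp [emit, hall, hx, h2]
    · have hall' : ¬ ∀ y ∈ t, y = x := by simpa using hall
      simp [emit, hall, ih seen, hall']

lemma exists_const_comb (xs : List Char) (l : Nat) (x : Char) :
    (∃ t ∈ PySem.List.combinations xs l, t.all (· == x)) ↔ l ≤ xs.count x := by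
  constructor
  · rintro ⟨t, ht, hall⟩
    rw [PySem.List.mem_combinations_iff] at ht
    have : t = List.replicate l x := by
      rw [List.eq_replicate_iff]
      exact ⟨ht.2, fun b hb => by simpa using (List.all_eq_true.1 hall) b hb⟩
    subst this
    exact List.replicate_sublist_iff.1 ht.1
  · intro h
    exact ⟨List.replicate l x, (PySem.List.mem_combinations_iff _ _ _).2
      ⟨List.replicate_sublist_iff.2 h, List.length_replicate⟩, by simp⟩
lemma emit_combinations (l : Nat) (xs : List Char) : ∀ seen,
    (emit seen (PySem.List.combinations xs (l + 1))).1 =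
      (PySem.Set.ofList xs).filter
        (fun c => !decide (c ∈ seen) && decide (l + 1 ≤ xs.count c)) := by
  induction xs with
  | nil => intro seen; simp [PySem.List.combinations_nil_succ, emit, PySem.Set.ofList_nil]
  | cons x xs ih =>
    intro seen
    rw [PySem.List.combinations_cons_succ, emit_append]
    rw [show (List.map (fun c => x :: c) (PySem.List.combinations xs l)) =
        (PySem.List.combinations xs l).map (x :: ·) from rfl]
    rw [emit_map_cons]
    simp only [exists_const_comb]
    by_cases hpos : x ∉ seen ∧ l ≤ xs.count x
    · rw [if_pos hpos]
      dsimp only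
      rw [ih (x :: seen)]
      rw [PySem.Set.ofList_cons]
      have hx : (!decide (x ∈ seen) && decide (l + 1 ≤ (x :: xs).count x)) = true := by
        have := hpos.2
        simp only [List.count_cons]
        simp [hpos.1]
        omega
      rw [List.filter_cons, if_pos hx]
      show x :: _ = x :: _
      rw [PySem.Set.discard, List.filter_filter]
      apply congrArg
      apply List.filter_congr
      intro y _
      by_cases hyx : y = x
      · subst hyx; simp
      · simp only [List.count_cons, beq_iff_eq, hyx, List.mem_cons]
        simp [hyx, Ne.symm hyx]
    · rw [if_neg hpos]
      dsimp only
      rw [ih seen, PySem.Set.ofList_cons]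
      have hx : (!decide (x ∈ seen) && decide (l + 1 ≤ (x :: xs).count x)) = false := by
        rcases not_and_or.1 hpos with h | h
        · simp only [not_not] at h; simp [h]
        · simp only [List.count_cons]; simp; omega
      rw [List.filter_cons, if_neg (by rw [hx]; exact Bool.false_ne_true)]
      rw [PySem.Set.discard, List.filter_filter]
      apply List.filter_congr
      intro y hy
      by_cases hyx : y = x
      · subst hyx
        rcases not_and_or.1 hpos with h | h
        · simp only [not_not] at h; simp [h]
        · simp; omega
      · simp only [List.count_cons, beq_iff_eq]
        simp [hyx, Ne.symm hyx]

lemma sim (combs : List (List Char)) (L : Nat) (hL : 0 < L) :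
    ∀ (S : PySem.Set String) (out : List String) (seen : List Char),
    (∀ t ∈ combs, t.length = L) →
    (∀ c : Char, String.ofList (List.replicate L c) ∈ S ↔ c ∈ seen) →
    (combs.foldl pvStepA (S, out)).2 =
        out ++ (emit seen combs).1.map (fun c => String.ofList (List.replicate L c))
      ∧ ∀ t ∈ (combs.foldl pvStepA (S, out)).1, t ∈ S ∨ t.toList.length = L := by
  induction combs with
  | nil =>
    intro S out seen _ _
    exact ⟨by simp [emit], fun t ht => Or.inl ht⟩
  | cons t rest ih =>
    intro S out seen hlen hinv
    match t with
    | [] =>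
      have h0 : L = 0 := by simpa using (hlen [] (by simp)).symm
      exact absurd h0 (by omega)
    | c :: r =>
      have hlenc : (c :: r).length = L := hlen _ (by simp)
      have hlenrest : ∀ t ∈ rest, t.length = L := fun t ht => hlen t (by simp [ht])
      by_cases hall : r.all (· == c)
      · -- constant combination: c::r = replicate L c
        have hrep : c :: r = List.replicate L c := by
          rw [List.eq_replicate_iff]
          refine ⟨hlenc, ?_⟩
          intro b hb
          rcases List.mem_cons.1 hb with rfl | hb
          · rfl
          · simpa using (List.all_eq_true.1 hall) b hb
        have hsc : String.ofList (PySem.List.sorted (c :: r) (fun x => x) false)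
            = String.ofList (List.replicate L c) := by
          rw [hrep, sorted_replicate]
        by_cases hc : c ∈ seen
        · -- already seen: skip
          have hmem : PySem.Set.contains S
              (String.ofList (PySem.List.sorted (c :: r) (fun x => x) false)) = true := by
            rw [PySem.Set.contains_iff, hsc]; exact (hinv c).2 hc
          have hstep : pvStepA (S, out) (c :: r) = (S, out) := by
            rw [pvStepA]; simp only [hmem, if_true]
          rw [List.foldl_cons, hstep]
          have := ih S out seen hlenrest hinv
          simp only [emit, hall, if_true, hc]
          exact this
        · -- new palindrome: emit c
          have hnotmem : String.ofList (List.replicate L c) ∉ S :=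
            fun h => hc ((hinv c).1 h)
          have hmemr : PySem.Set.contains S
              (String.ofList (List.replicate L c)) = false := by
            rw [← Bool.not_eq_true, PySem.Set.contains_iff]; exact hnotmem
          have hstep : pvStepA (S, out) (c :: r) =
              (S ++ [String.ofList (List.replicate L c)],
               out ++ [String.ofList (List.replicate L c)]) := by
            rw [pvStepA]
            simp only [hsc, hmemr, Bool.false_eq_true, if_false, is_pal_replicate, if_true,
              PySem.Set.add_of_not_mem hnotmem]
          have hinv' : ∀ d : Char, String.ofList (List.replicate L d) ∈
              S ++ [String.ofList (List.replicate L c)] ↔ d ∈ c :: seen := by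
            intro d
            simp only [List.mem_append, List.mem_cons, List.not_mem_nil, or_false]
            constructor
            · rintro (h | h)
              · exact Or.inr ((hinv d).1 h)
              · have h2 := ofList_inj h
                have hd : d ∈ List.replicate L c := by
                  rw [← h2]; exact List.mem_replicate.2 ⟨by omega, rfl⟩
                exact Or.inl (List.mem_replicate.1 hd).2
            · rintro (rfl | h)
              · exact Or.inr rfl
              · exact Or.inl ((hinv d).2 h)
          obtain ⟨ih1, ih2⟩ := ih (S ++ [String.ofList (List.replicate L c)])
            (out ++ [String.ofList (List.replicate L c)]) (c :: seen) hlenrest hinv'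
          rw [List.foldl_cons, hstep]
          constructor
          · rw [ih1]
            simp [emit, hall, hc, List.append_assoc]
          · intro t' ht'
            rcases ih2 t' ht' with h | h
            · rcases List.mem_append.1 h with h | h
              · exact Or.inl h
              · right
                rw [List.mem_singleton.1 h]
                simp
            · exact Or.inr h
      · -- non-constant combination: sorted form is not a palindrome
        have hne : ∃ y ∈ r, ¬ y = c := by simpa using hall
        have hperm := PySem.List.sorted_perm (c :: r) (fun x : Char => x) false
        have key1 : ∀ d : Char, String.ofList (List.replicate L d) ≠
            String.ofList (PySem.List.sorted (c :: r) (fun x => x) false) := by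
          intro d h
          have h2 := (ofList_inj h).symm
          have h3 : c :: r = List.replicate L d :=
            List.perm_replicate.mp (h2 ▸ hperm).symm
          obtain ⟨y, hy, hyc⟩ := hne
          have hcd : c = d := by
            have : c ∈ List.replicate L d := h3 ▸ List.mem_cons_self
            exact (List.mem_replicate.1 this).2
          have : y = d := by
            have : y ∈ List.replicate L d := h3 ▸ List.mem_cons_of_mem c hy
            exact (List.mem_replicate.1 this).2
          exact hyc (this.trans hcd.symm)
        have key2 : is_palindrome
            (String.ofList (PySem.List.sorted (c :: r) (fun x => x) false)) = false := by
          rw [is_palindrome, PySem.Str.slice?_none_none_neg_one]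
          rw [Bool.eq_false_iff]
          intro h
          have h1 := beq_iff_eq.1 h
          rw [String.toList_ofList] at h1
          have h3 := ofList_inj (Option.some.inj h1)
          have hpw : (PySem.List.sorted (c :: r) (fun x => x) false).Pairwise (· ≤ ·) := by
            simpa using PySem.List.sorted_pairwise (c :: r) (fun x : Char => x)
          have hconst := pal_sorted_const _ hpw h3
          obtain ⟨y, hy, hyc⟩ := hne
          exact hyc (hconst y (hperm.mem_iff.2 (by simp [hy])) c (hperm.mem_iff.2 (by simp)))
        by_cases hmem : PySem.Set.contains S
            (String.ofList (PySem.List.sorted (c :: r) (fun x => x) false)) = true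
        · have hstep : pvStepA (S, out) (c :: r) = (S, out) := by
            rw [pvStepA]; simp only [hmem, if_true]
          rw [List.foldl_cons, hstep]
          have := ih S out seen hlenrest hinv
          simp only [emit, hall, Bool.false_eq_true, if_false]
          exact this
        · rw [Bool.not_eq_true] at hmem
          have hnotmem : String.ofList (PySem.List.sorted (c :: r) (fun x => x) false) ∉ S := by
            intro hin
            exact Bool.false_ne_true (hmem ▸ (PySem.Set.contains_iff S _).2 hin)
          have hstep : pvStepA (S, out) (c :: r) =
              (S ++ [String.ofList (PySem.List.sorted (c :: r) (fun x => x) false)], out) := by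
            rw [pvStepA]
            simp only [hmem, Bool.false_eq_true, if_false, key2,
              PySem.Set.add_of_not_mem hnotmem]
          have hinv' : ∀ d : Char, String.ofList (List.replicate L d) ∈
              S ++ [String.ofList (PySem.List.sorted (c :: r) (fun x => x) false)] ↔
              d ∈ seen := by
            intro d
            simp only [List.mem_append, List.mem_cons, List.not_mem_nil, or_false]
            constructor
            · rintro (h | h)
              · exact (hinv d).1 h
              · exact absurd h (key1 d)
            · intro h; exact Or.inl ((hinv d).2 h)
          obtain ⟨ih1, ih2⟩ := ih
            (S ++ [String.ofList (PySem.List.sorted (c :: r) (fun x => x) false)])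
            out seen hlenrest hinv'
          rw [List.foldl_cons, hstep]
          constructor
          · rw [ih1]
            simp [emit, hall]
          · intro t' ht'
            rcases ih2 t' ht' with h | h
            · rcases List.mem_append.1 h with h | h
              · exact Or.inl h
              · right
                rw [List.mem_singleton.1 h]
                simpa using hperm.length_eq.trans hlenc
            · exact Or.inr h

lemma outer (cs : List Char) (n : Nat) :
    ((List.range n).foldl
        (fun st k => (PySem.List.combinations cs (k + 1)).foldl pvStepA st)
        ((PySem.Set.empty : PySem.Set String), ([] : List String))).2 =
      (List.range n).flatMap (fun k =>
        ((PySem.Set.ofList cs).filter (fun c => decide (k + 1 ≤ cs.count c))).map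
          (fun c => String.ofList (List.replicate (k + 1) c)))
    ∧ ∀ t ∈ ((List.range n).foldl
        (fun st k => (PySem.List.combinations cs (k + 1)).foldl pvStepA st)
        ((PySem.Set.empty : PySem.Set String), ([] : List String))).1,
        t.toList.length ≤ n := by
  induction n with
  | zero =>
    constructor
    · simp
    · intro t ht
      simp [PySem.Set.empty] at ht
  | succ n ih =>
    obtain ⟨ih1, ih2⟩ := ih
    rw [List.range_succ, List.foldl_append]
    set P := (List.range n).foldl
        (fun st k => (PySem.List.combinations cs (k + 1)).foldl pvStepA st)
        ((PySem.Set.empty : PySem.Set String), ([] : List String)) with hP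
    have hinv : ∀ c : Char, String.ofList (List.replicate (n + 1) c) ∈ P.1 ↔
        c ∈ ([] : List Char) := by
      intro c
      simp only [List.not_mem_nil, iff_false]
      intro h
      have := ih2 _ h
      simp at this
    have hlen : ∀ t ∈ PySem.List.combinations cs (n + 1), t.length = n + 1 :=
      fun t ht => ((PySem.List.mem_combinations_iff cs (n + 1) t).1 ht).2
    obtain ⟨s1, s2⟩ := sim (PySem.List.combinations cs (n + 1)) (n + 1) (by omega)
      P.1 P.2 [] hlen hinv
    rw [Prod.mk.eta] at s1 s2
    constructor
    · simp only [List.foldl_cons, List.foldl_nil]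
      rw [s1, ih1, List.flatMap_append, emit_combinations n cs []]
      simp
    · simp only [List.foldl_cons, List.foldl_nil]
      intro t ht
      rcases s2 t ht with h | h
      · exact le_trans (ih2 t h) (by omega)
      · omega

lemma alt_closed (s : String) :
    count_unique_palindromes_alt s =
      (List.range s.toList.length).flatMap (fun k =>
        ((PySem.Set.ofList s.toList).filter (fun c => decide (k + 1 ≤ s.toList.count c))).map
          (fun c => String.ofList (List.replicate (k + 1) c))) := by
  rw [count_unique_palindromes_alt]
  simp only [PySem.Dict.foldl_insert_getD_add_one_eq_counter]
  simp only [ge_iff_le, PySem.List.foldl_append_ite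
    (p := fun p : Char × Int => _ ≤ p.2)]
  simp only [PySem.List.foldl_append_eq_flatMap, List.nil_append]
  rw [PySem.Dict.items_counter]
  simp only [List.filter_map, List.map_map]
  have hr : PySem.List.pyRange 1 (PySem.List.len s.toList + 1) =
      (List.range s.toList.length).map (fun k : Nat => (1 : Int) + (k : Int)) := by
    rw [PySem.List.len_eq, PySem.List.pyRange_one]
    norm_num
  rw [hr, List.flatMap_map]
  congr 1
  funext k
  have h1 : (fun c : Char => String.ofList (PySem.List.pyRepeat [c] ((1 : Int) + k))) =
      (fun c : Char => String.ofList (List.replicate (k + 1) c)) := by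
    funext c
    rw [PySem.List.pyRepeat_singleton]
    congr 1
    congr 1
    omega
  have h2 : ∀ c : Char,
      (decide ((1 : Int) + k ≤ ((List.count c s.toList : Nat) : Int))) =
      decide (k + 1 ≤ List.count c s.toList) := by
    intro c
    apply decide_eq_decide.2
    constructor <;> intro h <;> [omega; (push_cast; omega)]
  simp only [Function.comp_def, h2]
  rw [← h1]

-- ===== VERDICT (by name: the statement is the Claim_ definition above) =====
theorem count_unique_palindromes_spec : Claim_equal_count_unique_palindromes := by
  intro s _
  show count_unique_palindromes s = count_unique_palindromes_alt s
  rw [count_unique_palindromes, alt_closed]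
  have hr : PySem.List.pyRange 1 (PySem.List.len s.toList + 1) =
      (List.range s.toList.length).map (fun k : Nat => (1 : Int) + (k : Int)) := by
    rw [PySem.List.len_eq, PySem.List.pyRange_one]
    norm_num
  rw [hr, List.foldl_map]
  rw [PySem.List.foldl_congr_mem _ _
    (fun st (k : Nat) => (PySem.List.combinations s.toList (k + 1)).foldl pvStepA st) _
    (by
      intro acc x _
      have hx : ((1 : Int) + (x : Int)).toNat = x + 1 := by omega
      rw [hx])]
  exact (outer s.toList s.toList.length).1
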